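-- pv_equiv track=rewrite | github.com/ProteinsWebTeam/pronto | pronto/api/checks/entries.py | ck_forbidden_terms
-- ===== SOURCE A (Python) =====
-- from typing import Dict, List, Optional, Set, Tuple
--
-- DoS = Dict[str, Set[str]]
--
-- LoS = List[str]
--
-- Err = List[Tuple[str, Optional[str]]]
--
-- LoT = List[Tuple[str, str, str]]
--
-- def ck_forbidden_terms(entries: LoT, terms: LoS, exceptions: DoS) -> Err:
--     errors = []
--     for acc, name, short_name in entries:
--         entry_exceptions = exceptions.get(acc, set())
--         for term in terms:
--             if term in name and term not in entry_exceptions: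
--                 errors.append((acc, term))
--
--     return errors
-- ===== SOURCE B (Python) =====
-- def ck_forbidden_terms(entries, terms, exceptions):
--     # Position-major scan with a first-character index: group the (non-empty) terms
--     # by their first character once, then walk each name position by position and
--     # test only the terms starting with that character as prefixes there, collecting
--     # the terms found in a set; finally emit matches in terms-list order.
--     # (The empty term is a substring of every name.)
--     by_first = {}
--     for t in terms:
--         if t:
--             by_first.setdefault(t[0], []).append(t)
--     errors = []
--     for acc, name, _short_name in entries:
--         entry_exceptions = exceptions.get(acc, set())
--         found = set()
--         for i in range(len(name)):
--             for t in by_first.get(name[i], ()):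
--                 if name.startswith(t, i):
--                     found.add(t)
--         for t in terms:
--             if (not t or t in found) and t not in entry_exceptions:
--                 errors.append((acc, t))
--     return errors
-- ===== Notes on version B (the rewrite author's own statement) =====
-- stated objective: alternative
-- what changed: B replaces A's term-major substring test (`term in name` per term) by a multi-pattern scan: the terms are grouped once by first character, each name is walked position by position testing only the terms starting with that character as prefixes there, the terms found go into a set, and matches are emitted in terms-list order.
import Mathlib
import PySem

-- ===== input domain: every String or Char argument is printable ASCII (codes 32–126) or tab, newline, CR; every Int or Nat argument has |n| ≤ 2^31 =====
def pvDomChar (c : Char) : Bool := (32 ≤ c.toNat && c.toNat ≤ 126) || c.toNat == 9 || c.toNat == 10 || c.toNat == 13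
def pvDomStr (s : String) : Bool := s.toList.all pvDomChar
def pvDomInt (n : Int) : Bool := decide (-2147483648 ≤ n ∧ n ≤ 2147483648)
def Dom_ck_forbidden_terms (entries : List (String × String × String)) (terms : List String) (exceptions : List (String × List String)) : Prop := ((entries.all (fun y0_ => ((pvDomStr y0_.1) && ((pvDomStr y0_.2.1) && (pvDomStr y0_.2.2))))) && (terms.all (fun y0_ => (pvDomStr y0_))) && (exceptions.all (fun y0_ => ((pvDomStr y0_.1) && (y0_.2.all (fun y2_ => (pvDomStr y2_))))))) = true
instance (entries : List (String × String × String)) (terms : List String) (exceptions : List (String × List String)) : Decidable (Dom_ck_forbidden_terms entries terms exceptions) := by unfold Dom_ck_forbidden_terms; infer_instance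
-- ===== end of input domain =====

-- B replaces A's per-term substring tests by a position-major scan of each name with a
-- first-character index over the terms; an alternative multi-pattern-scan algorithm, proved equal.

-- ===== PORT A =====
-- for acc, name, short_name in entries: for term in terms: if term in name and term not in exceptions.get(acc, set()): errors.append((acc, term))
def ck_forbidden_terms (entries : List (String × String × String)) (terms : List String) (exceptions : List (String × List String)) : List (String × Option String) :=
  entries.foldl (fun errors e =>
    let entry_exceptions := (PySem.Dict.mk exceptions).getD e.1 []
    terms.foldl (fun errs term =>
      if PySem.Str.isIn term e.2.1 && !(PySem.Set.contains entry_exceptions term) then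
        errs ++ [(e.1, some term)]
      else errs) errors) []

-- ===== PORT B =====
-- Source B: by_first = {}; for t in terms: if t: by_first.setdefault(t[0], []).append(t)
def pvByFirst (terms : List String) : PySem.Dict Char (List String) :=
  terms.foldl (fun d t =>
    match t.toList with
    | [] => d
    | c :: _ => d.insert c (d.getD c [] ++ [t])) PySem.Dict.empty

-- Source B inner scan: for i in range(len(name)): for t in by_first.get(name[i], ()): if name.startswith(t, i): found.add(t)
-- (name[i] is ported as (name.drop i).headD ' ' — for i < len(name) the default is never used;
--  name.startswith(t, i) for 0 ≤ i < len(name) is ported exactly as: t.toList is a prefix of name.drop i)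
def pvFoundAt (name : List Char) (terms : List String) : PySem.Set String :=
  (List.range name.length).foldl (fun found i =>
    ((pvByFirst terms).getD ((name.drop i).headD ' ') []).foldl
      (fun found t =>
        if PySem.Chars.startswith (name.drop i) t.toList then PySem.Set.add found t else found)
      found) PySem.Set.empty

def ck_forbidden_terms_alt (entries : List (String × String × String)) (terms : List String) (exceptions : List (String × List String)) : List (String × Option String) :=
  entries.foldl (fun errors e =>
    let entry_exceptions := (PySem.Dict.mk exceptions).getD e.1 []
    let found := pvFoundAt e.2.1.toList terms
    terms.foldl (fun errs t =>
      if (t.toList.isEmpty || PySem.Set.contains found t) && !(PySem.Set.contains entry_exceptions t) then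
        errs ++ [(e.1, some t)]
      else errs) errors) []

-- ===== PRECONDITION & SPEC =====
def Spec_ck_forbidden_terms (entries : List (String × String × String)) (terms : List String) (exceptions : List (String × List String)) (out : List (String × Option String)) : Prop := out = ck_forbidden_terms_alt entries terms exceptions
instance (entries : List (String × String × String)) (terms : List String) (exceptions : List (String × List String)) (out : List (String × Option String)) : Decidable (Spec_ck_forbidden_terms entries terms exceptions out) := by unfold Spec_ck_forbidden_terms; infer_instance

-- ===== CLAIM (what is proved, stated in full; the proofs are below) =====
def Claim_equal_ck_forbidden_terms : Prop := ∀ (entries : List (String × String × String)) (terms : List String) (exceptions : List (String × List String)), Dom_ck_forbidden_terms entries terms exceptions → Spec_ck_forbidden_terms entries terms exceptions (ck_forbidden_terms entries terms exceptions)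

-- ===== LEMMAS AND PROOFS =====

-- the first-character index holds exactly the terms whose first character is the key
lemma mem_byFirst_aux (terms : List String) (d : PySem.Dict Char (List String)) (c : Char) (t : String) :
    t ∈ (terms.foldl (fun d t =>
          match t.toList with
          | [] => d
          | c :: _ => d.insert c (d.getD c [] ++ [t])) d).getD c [] ↔
      t ∈ d.getD c [] ∨ (t ∈ terms ∧ t.toList.head? = some c) := by
  induction terms generalizing d with
  | nil => simp
  | cons u rest ih =>
    simp only [List.foldl_cons, ih, List.mem_cons]
    cases hu : u.toList with
    | nil =>
      constructor
      · rintro (h | ⟨ht, hh⟩)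
        · exact Or.inl h
        · exact Or.inr ⟨Or.inr ht, hh⟩
      · rintro (h | ⟨(rfl | ht), hh⟩)
        · exact Or.inl h
        · rw [hu] at hh; cases hh
        · exact Or.inr ⟨ht, hh⟩
    | cons c0 cs0 =>
      rw [PySem.Dict.getD_insert]
      by_cases hc : c = c0
      · subst hc
        rw [if_pos rfl]
        simp only [List.mem_append, List.mem_singleton]
        constructor
        · rintro ((h | h2) | ⟨ht, hh⟩)
          · exact Or.inl h
          · exact Or.inr ⟨Or.inl h2, by rw [h2, hu]; rfl⟩
          · exact Or.inr ⟨Or.inr ht, hh⟩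
        · rintro (h | ⟨(h2 | ht), hh⟩)
          · exact Or.inl (Or.inl h)
          · exact Or.inl (Or.inr h2)
          · exact Or.inr ⟨ht, hh⟩
      · rw [if_neg hc]
        constructor
        · rintro (h | ⟨ht, hh⟩)
          · exact Or.inl h
          · exact Or.inr ⟨Or.inr ht, hh⟩
        · rintro (h | ⟨(h2 | ht), hh⟩)
          · exact Or.inl h
          · rw [h2, hu] at hh; exact absurd (Option.some.inj hh) (Ne.symm hc)
          · exact Or.inr ⟨ht, hh⟩

lemma mem_byFirst (terms : List String) (c : Char) (t : String) :
    t ∈ (pvByFirst terms).getD c [] ↔ t ∈ terms ∧ t.toList.head? = some c := by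
  unfold pvByFirst
  rw [mem_byFirst_aux]
  simp [PySem.Dict.getD_empty]

-- membership in B's inner per-position fold
lemma mem_inner_fold (cands : List String) (s : PySem.Set String) (q : String → Bool) (t : String) :
    t ∈ cands.foldl (fun found u => if q u then PySem.Set.add found u else found) s ↔
      t ∈ s ∨ (t ∈ cands ∧ q t = true) := by
  induction cands generalizing s with
  | nil => simp
  | cons u rest ih =>
    simp only [List.foldl_cons, ih, List.mem_cons]
    by_cases hq : q u = true
    · simp only [if_pos hq, PySem.Set.mem_add]
      constructor
      · rintro ((h | rfl) | ⟨h, hqt⟩)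
        · exact Or.inl h
        · exact Or.inr ⟨Or.inl rfl, hq⟩
        · exact Or.inr ⟨Or.inr h, hqt⟩
      · rintro (h | ⟨(rfl | h), hqt⟩)
        · exact Or.inl (Or.inl h)
        · exact Or.inl (Or.inr rfl)
        · exact Or.inr ⟨h, hqt⟩
    · simp only [if_neg hq]
      constructor
      · rintro (h | ⟨h, hqt⟩)
        · exact Or.inl h
        · exact Or.inr ⟨Or.inr h, hqt⟩
      · rintro (h | ⟨(rfl | h), hqt⟩)
        · exact Or.inl h
        · exact absurd hqt hq
        · exact Or.inr ⟨h, hqt⟩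

-- membership in B's double fold over positions (candidate list depending on the position)
lemma mem_outer_fold (idxs : List Nat) (cands : Nat → List String) (s : PySem.Set String)
    (p : Nat → String → Bool) (t : String) :
    t ∈ idxs.foldl (fun found i =>
          (cands i).foldl (fun found u => if p i u then PySem.Set.add found u else found) found) s ↔
      t ∈ s ∨ ∃ i ∈ idxs, t ∈ cands i ∧ p i t = true := by
  induction idxs generalizing s with
  | nil => simp
  | cons i rest ih =>
    simp only [List.foldl_cons, ih, mem_inner_fold]
    constructor
    · rintro ((h | ⟨ht, hp⟩) | ⟨j, hj, ht, hp⟩)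
      · exact Or.inl h
      · exact Or.inr ⟨i, by simp, ht, hp⟩
      · exact Or.inr ⟨j, by simp [hj], ht, hp⟩
    · rintro (h | ⟨j, hj, ht, hp⟩)
      · exact Or.inl (Or.inl h)
      · rcases List.mem_cons.mp hj with rfl | hj
        · exact Or.inl (Or.inr ⟨ht, hp⟩)
        · exact Or.inr ⟨j, hj, ht, hp⟩

-- a NON-EMPTY term is in the found-set exactly when it is a prefix of the name at some position
lemma mem_foundAt (name : List Char) (terms : List String) (t : String) (c : Char) (cs : List Char)
    (hte : t.toList = c :: cs) :
    t ∈ pvFoundAt name terms ↔ ∃ i < name.length, t ∈ terms ∧ t.toList <+: name.drop i := by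
  unfold pvFoundAt
  rw [mem_outer_fold]
  constructor
  · rintro (h | ⟨i, hi, hcand, hp⟩)
    · cases h
    · exact ⟨i, List.mem_range.mp hi, ((mem_byFirst terms _ t).mp hcand).1,
        (PySem.Chars.startswith_iff _ _).mp hp⟩
  · rintro ⟨i, hi, ht, hp⟩
    refine Or.inr ⟨i, List.mem_range.mpr hi, ?_, (PySem.Chars.startswith_iff _ _).mpr hp⟩
    rcases hp with ⟨tail, htail⟩
    rw [hte] at htail
    rw [mem_byFirst, hte]
    refine ⟨ht, ?_⟩
    rw [← htail]
    rfl

-- the per-term condition of A equals the per-term condition of B, for every term in the list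
lemma cond_eq (name : String) (terms : List String) (t : String) (ht : t ∈ terms) :
    PySem.Str.isIn t name =
      (t.toList.isEmpty || PySem.Set.contains (pvFoundAt name.toList terms) t) := by
  rw [PySem.Str.isIn_eq]
  by_cases hE : t.toList = []
  · simp [hE, PySem.Chars.isIn_nil]
  · rcases List.exists_cons_of_ne_nil hE with ⟨c, cs, hte⟩
    have hne : t.toList.isEmpty = false := by simp [hte]
    rw [hne, Bool.false_or]
    by_cases h : PySem.Chars.isIn t.toList name.toList = true
    · rw [h]
      rcases (PySem.Chars.exists_prefix_drop_iff_isIn t.toList name.toList).mpr h with ⟨j, hj⟩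
      have hjlt : j < name.toList.length := by
        by_contra hge
        rw [List.drop_eq_nil_of_le (le_of_not_gt hge)] at hj
        have := List.prefix_nil.mp hj
        simp [hte] at this
      exact ((PySem.Set.contains_iff _ _).mpr
        ((mem_foundAt _ _ _ c cs hte).mpr ⟨j, hjlt, ht, hj⟩)).symm
    · rw [Bool.eq_false_iff.mpr h]
      symm
      rw [Bool.eq_false_iff]
      intro hc
      rcases (mem_foundAt _ _ _ c cs hte).mp ((PySem.Set.contains_iff _ _).mp hc) with ⟨i, _, _, hp⟩
      exact h ((PySem.Chars.exists_prefix_drop_iff_isIn t.toList name.toList).mp ⟨i, hp⟩)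

-- A's and B's per-entry inner folds agree
lemma inner_eq (e : String × String × String) (terms : List String)
    (exceptions : List (String × List String)) (errs : List (String × Option String)) :
    terms.foldl (fun errs term =>
        if PySem.Str.isIn term e.2.1 && !(PySem.Set.contains ((PySem.Dict.mk exceptions).getD e.1 []) term) then
          errs ++ [(e.1, some term)] else errs) errs =
    terms.foldl (fun errs t =>
        if (t.toList.isEmpty || PySem.Set.contains (pvFoundAt e.2.1.toList terms) t) &&
            !(PySem.Set.contains ((PySem.Dict.mk exceptions).getD e.1 []) t) then
          errs ++ [(e.1, some t)] else errs) errs := by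
  apply PySem.List.foldl_congr_mem
  intro acc t ht
  rw [cond_eq e.2.1 terms t ht]

-- ===== VERDICT (by name: the statement is the Claim_ definition above) =====
theorem ck_forbidden_terms_spec : Claim_equal_ck_forbidden_terms := by
  intro entries terms exceptions _
  unfold Spec_ck_forbidden_terms ck_forbidden_terms ck_forbidden_terms_alt
  apply PySem.List.foldl_congr_mem
  intro acc e _
  exact inner_eq e terms exceptions acc
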